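-- pv_equiv track=rewrite | github.com/DuckInTub/AOC_2023 | 14/sol.py | uid
-- ===== SOURCE A (Python) =====
-- from functools import reduce
--
-- def uid(array):
--     rows = []
--     bit_or = lambda x, y : x | y
--     for row in array:
--         rows.append(
--         reduce(bit_or, [
--             2 ** i
--             for i, char in enumerate(row)
--             if char == "O"
--         ], 0))
--     return tuple(rows)
-- ===== SOURCE B (Python) =====
-- def uid(array):
--     out = []
--     for row in array:
--         v = 0
--         for ch in reversed(row):
--             v = 2 * v + (1 if ch == "O" else 0)
--         out.append(v)
--     return tuple(out)
-- ===== Notes on version B (the rewrite author's own statement) =====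
-- stated objective: simpler
-- what changed: Replaces the reduce/OR of 2**i powers over enumerate with a plain Horner accumulation (v = 2*v + bit) over the row scanned in reverse, using no bit operations, powers, intermediate lists or enumerate.
import Mathlib
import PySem

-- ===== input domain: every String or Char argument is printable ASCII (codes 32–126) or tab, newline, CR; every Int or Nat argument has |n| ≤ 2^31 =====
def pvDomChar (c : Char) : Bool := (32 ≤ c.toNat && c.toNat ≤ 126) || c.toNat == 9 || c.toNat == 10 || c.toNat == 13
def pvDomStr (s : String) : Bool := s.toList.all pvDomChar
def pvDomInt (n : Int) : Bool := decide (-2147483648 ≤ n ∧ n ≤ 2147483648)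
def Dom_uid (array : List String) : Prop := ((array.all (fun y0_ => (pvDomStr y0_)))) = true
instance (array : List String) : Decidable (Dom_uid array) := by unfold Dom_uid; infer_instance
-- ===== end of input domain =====

-- B replaces A's reduce/OR of 2**i powers by a Horner accumulation over the reversed row (simpler; same cost).

-- ===== PORT A =====
-- reduce(bit_or, [2 ** i for i, char in enumerate(row) if char == "O"], 0)
-- enumerate indices are ≥ 0, so 2 ** i is ported exactly as (2 : Int) ^ i.toNat
def uid (array : List String) : List Int :=
  array.foldl
    (fun rows row =>
      rows ++ [((PySem.List.enumerate row.toList).filterMap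
        (fun p => if p.2 = 'O' then some ((2 : Int) ^ p.1.toNat) else none)).foldl
        (fun x y => PySem.Int.bor x y) 0])
    []

-- ===== PORT B =====
def uid_alt (array : List String) : List Int :=
  array.foldl
    (fun out row =>
      out ++ [row.toList.reverse.foldl
        (fun v ch => 2 * v + (if ch = 'O' then 1 else 0)) (0 : Int)])
    []

-- ===== PRECONDITION & SPEC =====
def Spec_uid (array : List String) (out : List Int) : Prop := out = uid_alt array
instance (array : List String) (out : List Int) : Decidable (Spec_uid array out) := by unfold Spec_uid; infer_instance

-- ===== CLAIM (what is proved, stated in full; the proofs are below) =====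
def Claim_equal_uid : Prop := ∀ (array : List String), Dom_uid array → Spec_uid array (uid array)

-- ===== LEMMAS AND PROOFS =====

-- little-endian value of a row: bit i is set iff character i is 'O'
def pvVal (cs : List Char) : Int :=
  cs.foldr (fun c r => 2 * r + (if c = 'O' then 1 else 0)) 0

-- powers 2^k, 2^(k+1), … contributed by the 'O' characters of cs
def pvPows (cs : List Char) (k : Nat) : List Int :=
  match cs with
  | [] => []
  | c :: cs => (if c = 'O' then [(2 : Int) ^ k] else []) ++ pvPows cs (k + 1)

lemma pv_filterMap_enumerate (cs : List Char) (s : Nat) :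
    (PySem.List.enumerate cs (s : Int)).filterMap
      (fun p => if p.2 = 'O' then some ((2 : Int) ^ p.1.toNat) else none) = pvPows cs s := by
  induction cs generalizing s with
  | nil => simp [PySem.List.enumerate_nil, pvPows]
  | cons c cs ih =>
      rw [PySem.List.enumerate_cons]
      have h1 : ((s : Int) + 1) = ((s + 1 : Nat) : Int) := by push_cast; ring
      simp only [List.filterMap_cons, h1, ih (s + 1), pvPows]
      by_cases hc : c = 'O' <;> simp [hc, Int.toNat_natCast]

lemma pv_nat_lor_pow (k : Nat) : ∀ a : Nat, a < 2 ^ k → a ||| 2 ^ k = a + 2 ^ k := by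
  induction k with
  | zero => intro a ha; interval_cases a; decide
  | succ k ih =>
      intro a ha
      have hq : a / 2 < 2 ^ k := by omega
      have h := ih (a / 2) hq
      have hbit0 : ∀ n : Nat, Nat.bit false n = 2 * n := fun n => by simp [Nat.bit]
      have hbit1 : ∀ n : Nat, Nat.bit true n = 2 * n + 1 := fun n => by simp [Nat.bit]
      rcases Nat.even_or_odd a with ⟨m, hm⟩ | ⟨m, hm⟩
      · have e1 : a ||| 2 ^ (k + 1) = Nat.bit false (a / 2) ||| Nat.bit false (2 ^ k) := by
          rw [hbit0, hbit0, pow_succ, Nat.mul_comm (2 ^ k) 2]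
          congr 1
          omega
        rw [e1, Nat.lor_bit, Bool.or_self, hbit0, h, pow_succ]
        have : a = 2 * (a / 2) := by omega
        omega
      · have e1 : a ||| 2 ^ (k + 1) = Nat.bit true (a / 2) ||| Nat.bit false (2 ^ k) := by
          rw [hbit1, hbit0, pow_succ, Nat.mul_comm (2 ^ k) 2]
          congr 1
          omega
        rw [e1, Nat.lor_bit, Bool.or_false, hbit1, h, pow_succ]
        have : a = 2 * (a / 2) + 1 := by omega
        omega

lemma pv_bor_pow (acc : Int) (k : Nat) (h0 : 0 ≤ acc) (h1 : acc < 2 ^ k) :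
    PySem.Int.bor acc ((2 : Int) ^ k) = acc + 2 ^ k := by
  have hp : (0 : Int) ≤ 2 ^ k := by positivity
  rw [PySem.Int.bor_of_nonneg h0 hp]
  have ht : ((2 : Int) ^ k).toNat = 2 ^ k := by
    rw [show ((2 : Int) ^ k) = ((2 ^ k : Nat) : Int) by push_cast; ring]; exact Int.toNat_natCast _
  have ha : acc.toNat < 2 ^ k := by omega
  rw [ht, pv_nat_lor_pow k acc.toNat ha]
  push_cast; omega

lemma pv_foldl_bor (cs : List Char) : ∀ (k : Nat) (acc : Int), 0 ≤ acc → acc < 2 ^ k →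
    (pvPows cs k).foldl (fun x y => PySem.Int.bor x y) acc = acc + 2 ^ k * pvVal cs := by
  induction cs with
  | nil => intro k acc _ _; simp [pvPows, pvVal]
  | cons c cs ih =>
      intro k acc h0 h1
      have hppos : (0 : Int) < 2 ^ k := by positivity
      by_cases hc : c = 'O'
      · subst hc
        have hb := pv_bor_pow acc k h0 h1
        have h0' : (0 : Int) ≤ acc + 2 ^ k := by omega
        have h1' : acc + 2 ^ k < 2 ^ (k + 1) := by rw [pow_succ]; omega
        rw [show pvPows ('O' :: cs) k = (2 : Int) ^ k :: pvPows cs (k + 1) by simp [pvPows],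
          List.foldl_cons, hb, ih (k + 1) _ h0' h1',
          show pvVal ('O' :: cs) = 2 * pvVal cs + 1 by simp [pvVal], pow_succ]
        ring
      · have h1' : acc < 2 ^ (k + 1) := by
          have : (2 : Int) ^ k ≤ 2 ^ (k + 1) := by rw [pow_succ]; omega
          omega
        rw [show pvPows (c :: cs) k = pvPows cs (k + 1) by simp [pvPows, hc],
          ih (k + 1) acc h0 h1',
          show pvVal (c :: cs) = 2 * pvVal cs by simp [pvVal, hc], pow_succ]
        ring

lemma pv_horner_rev (cs : List Char) : ∀ a : Int,
    cs.reverse.foldl (fun v ch => 2 * v + (if ch = 'O' then 1 else 0)) a =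
      a * 2 ^ cs.length + pvVal cs := by
  induction cs with
  | nil => intro a; simp [pvVal]
  | cons c cs ih =>
      intro a
      simp only [List.reverse_cons, List.foldl_append, List.foldl_cons, List.foldl_nil, ih a,
        pvVal, List.foldr_cons, List.length_cons]
      show 2 * (a * 2 ^ cs.length + pvVal cs) + _ = a * 2 ^ (cs.length + 1) + (2 * pvVal cs + _)
      rw [pow_succ]; ring

lemma pv_row_eq (row : String) :
    ((PySem.List.enumerate row.toList).filterMap
        (fun p => if p.2 = 'O' then some ((2 : Int) ^ p.1.toNat) else none)).foldl
        (fun x y => PySem.Int.bor x y) 0 =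
      row.toList.reverse.foldl (fun v ch => 2 * v + (if ch = 'O' then 1 else 0)) (0 : Int) := by
  have h := pv_filterMap_enumerate row.toList 0
  simp only [Nat.cast_zero] at h
  rw [h, pv_foldl_bor row.toList 0 0 le_rfl (by norm_num), pv_horner_rev row.toList 0]
  ring

lemma pv_foldl_append_map {α β : Type} (g : α → β) (l : List α) : ∀ acc : List β,
    l.foldl (fun out x => out ++ [g x]) acc = acc ++ l.map g := by
  induction l with
  | nil => intro acc; simp
  | cons x l ih => intro acc; simp [ih]

-- ===== VERDICT (by name: the statement is the Claim_ definition above) =====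
theorem uid_spec : Claim_equal_uid := by
  intro array _
  unfold Spec_uid uid uid_alt
  rw [pv_foldl_append_map, pv_foldl_append_map]
  simp only [List.nil_append]
  exact List.map_congr_left fun row _ => pv_row_eq row
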